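-- pv_equiv track=rewrite | github.com/Kusumayadav19/DSA | LEETCODE/PYTHON/StoneGameI.py | StoneGameOne
-- ===== SOURCE A (Python) =====
-- def StoneGameOne(piles):
--     left, right = 0, len(piles) - 1
--     alice, bob = 0, 0
--     while left <= right:
--         if piles[left] >= piles[right]:
--             alice += piles[left]
--             bob += piles[right]
--         else:
--             alice += piles[right]
--             bob += piles[left]
--         left += 1
--         right -= 1
--     return alice > bob
-- ===== SOURCE B (Python) =====
-- def StoneGameOne(piles):
--     return piles != piles[::-1]
-- ===== Notes on version B (the rewrite author's own statement) =====
-- stated objective: simpler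
-- what changed: Replaces the two-pointer running-sum loop (alice takes the larger end, bob the smaller) with the closed-form palindrome test piles != piles[::-1]: alice's lead equals the sum of |piles[i]-piles[n-1-i]|, which is positive exactly when the list is not a palindrome.
import Mathlib
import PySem

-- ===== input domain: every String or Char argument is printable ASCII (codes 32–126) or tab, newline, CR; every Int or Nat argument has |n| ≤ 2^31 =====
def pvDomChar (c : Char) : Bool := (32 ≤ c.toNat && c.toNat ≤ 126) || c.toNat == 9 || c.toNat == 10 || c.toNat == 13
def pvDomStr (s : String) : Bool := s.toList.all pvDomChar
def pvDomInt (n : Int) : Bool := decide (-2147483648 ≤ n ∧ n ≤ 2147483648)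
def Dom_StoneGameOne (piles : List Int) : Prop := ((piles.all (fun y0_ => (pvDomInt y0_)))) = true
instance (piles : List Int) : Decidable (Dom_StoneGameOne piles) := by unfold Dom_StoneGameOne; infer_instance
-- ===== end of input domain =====

-- B replaces A's two-pointer running-sum loop by the closed-form palindrome test
-- piles != piles[::-1] (objective: simpler); return values proved equal on all inputs.

-- ===== PORT A =====
-- the while loop of A: left/right pointers, alice/bob accumulators
def pvGoA (piles : List Int) (left right alice bob : Int) : Bool :=
  if left ≤ right then
    if piles.getD left.toNat 0 ≥ piles.getD right.toNat 0 then
      pvGoA piles (left + 1) (right - 1) (alice + piles.getD left.toNat 0) (bob + piles.getD right.toNat 0)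
    else
      pvGoA piles (left + 1) (right - 1) (alice + piles.getD right.toNat 0) (bob + piles.getD left.toNat 0)
  else decide (alice > bob)
termination_by (right + 1 - left).toNat
decreasing_by all_goals omega

def StoneGameOne (piles : List Int) : Bool :=
  pvGoA piles 0 ((piles.length : Int) - 1) 0 0

-- ===== PORT B =====
def StoneGameOne_alt (piles : List Int) : Bool :=
  piles != piles.reverse

-- ===== PRECONDITION & SPEC =====
def Spec_StoneGameOne (piles : List Int) (out : Bool) : Prop := out = StoneGameOne_alt piles
instance (piles : List Int) (out : Bool) : Decidable (Spec_StoneGameOne piles out) := by unfold Spec_StoneGameOne; infer_instance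

-- ===== CLAIM (what is proved, stated in full; the proofs are below) =====
def Claim_equal_StoneGameOne : Prop := ∀ (piles : List Int), Dom_StoneGameOne piles → Spec_StoneGameOne piles (StoneGameOne piles)

-- ===== LEMMAS AND PROOFS =====

-- Alice's final lead over Bob contributed by the window [left, right]:
-- the sum of |piles[l] - piles[r]| over the symmetric pairs.
def pvW (piles : List Int) (left right : Int) : Int :=
  if left ≤ right then
    |piles.getD left.toNat 0 - piles.getD right.toNat 0| + pvW piles (left + 1) (right - 1)
  else 0
termination_by (right + 1 - left).toNat
decreasing_by all_goals omega

theorem pvW_nonneg (piles : List Int) (left right : Int) : 0 ≤ pvW piles left right := by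
  rw [pvW]
  split
  · have := pvW_nonneg piles (left + 1) (right - 1)
    have := abs_nonneg (piles.getD left.toNat 0 - piles.getD right.toNat 0)
    omega
  · omega
termination_by (right + 1 - left).toNat
decreasing_by all_goals omega

theorem pvGoA_eq (piles : List Int) (left right alice bob : Int) :
    pvGoA piles left right alice bob = decide (alice + pvW piles left right > bob) := by
  rw [pvGoA, pvW]
  split
  · next h =>
    split
    · next hge =>
      rw [pvGoA_eq piles (left + 1) (right - 1)]
      have habs : |piles.getD left.toNat 0 - piles.getD right.toNat 0|
          = piles.getD left.toNat 0 - piles.getD right.toNat 0 := abs_of_nonneg (by omega)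
      rw [decide_eq_decide]
      omega
    · next hlt =>
      rw [pvGoA_eq piles (left + 1) (right - 1)]
      have habs : |piles.getD left.toNat 0 - piles.getD right.toNat 0|
          = -(piles.getD left.toNat 0 - piles.getD right.toNat 0) := abs_of_nonpos (by omega)
      rw [decide_eq_decide]
      omega
  · rw [decide_eq_decide]
    omega
termination_by (right + 1 - left).toNat
decreasing_by all_goals omega

theorem pvW_zero_iff (piles : List Int) (left right : Int) :
    pvW piles left right = 0 ↔
      ∀ i : Int, left ≤ i → i ≤ right →
        piles.getD i.toNat 0 = piles.getD (left + right - i).toNat 0 := by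
  rw [pvW]
  split
  · next h =>
    have hW := pvW_nonneg piles (left + 1) (right - 1)
    have habs := abs_nonneg (piles.getD left.toNat 0 - piles.getD right.toNat 0)
    have hzero : |piles.getD left.toNat 0 - piles.getD right.toNat 0| + pvW piles (left + 1) (right - 1) = 0
        ↔ |piles.getD left.toNat 0 - piles.getD right.toNat 0| = 0 ∧ pvW piles (left + 1) (right - 1) = 0 := by omega
    rw [hzero, abs_eq_zero, sub_eq_zero, pvW_zero_iff piles (left + 1) (right - 1)]
    constructor
    · rintro ⟨heq, hrec⟩ i hli hir
      by_cases hil : i = left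
      · rw [hil, show left + right - left = right by omega]
        exact heq
      · by_cases hir' : i = right
        · rw [hir', show left + right - right = left by omega]
          exact heq.symm
        · have := hrec i (by omega) (by omega)
          have harith : left + 1 + (right - 1) - i = left + right - i := by omega
          rwa [harith] at this
    · intro hall
      refine ⟨?_, ?_⟩
      · have := hall left le_rfl h
        have harith : left + right - left = right := by omega
        rwa [harith] at this
      · intro i hli hir
        have := hall i (by omega) (by omega)
        have harith : left + 1 + (right - 1) - i = left + right - i := by omega
        rwa [harith]
  · next h =>
    constructor
    · intro _ i hli hir; omega
    · intro _; rfl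
termination_by (right + 1 - left).toNat
decreasing_by all_goals omega

theorem palindrome_iff (piles : List Int) :
    piles = piles.reverse ↔
      ∀ i : Int, 0 ≤ i → i ≤ (piles.length : Int) - 1 →
        piles.getD i.toNat 0 = piles.getD (0 + ((piles.length : Int) - 1) - i).toNat 0 := by
  constructor
  · intro hpal i h0 hn
    have hlt : i.toNat < piles.length := by omega
    have hrlt : i.toNat < piles.reverse.length := by simp; omega
    have hlt2 : (0 + ((piles.length : Int) - 1) - i).toNat < piles.length := by omega
    have h1 : piles.getD i.toNat 0 = piles.reverse.getD i.toNat 0 :=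
      congrArg (fun l => l.getD i.toNat 0) hpal
    rw [h1, List.getD_eq_getElem piles.reverse 0 hrlt, List.getD_eq_getElem piles 0 hlt2,
      List.getElem_reverse]
    congr 1
    simp
    omega
  · intro hall
    have hlen : piles.length = piles.reverse.length := by simp
    apply List.ext_getElem hlen
    intro j h1 h2
    have := hall j (by omega) (by omega)
    have hjt : ((j : Int)).toNat = j := by omega
    have hlt2 : (0 + ((piles.length : Int) - 1) - j).toNat < piles.length := by omega
    rw [hjt, List.getD_eq_getElem piles 0 h1, List.getD_eq_getElem piles 0 hlt2] at this
    rw [this, List.getElem_reverse]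
    congr 1
    omega

-- ===== VERDICT (by name: the statement is the Claim_ definition above) =====
theorem StoneGameOne_spec : Claim_equal_StoneGameOne := by
  intro piles _
  unfold Spec_StoneGameOne StoneGameOne StoneGameOne_alt
  rw [pvGoA_eq]
  by_cases h : piles = piles.reverse
  · have hz : pvW piles 0 ((piles.length : Int) - 1) = 0 :=
      (pvW_zero_iff piles 0 ((piles.length : Int) - 1)).mpr ((palindrome_iff piles).mp h)
    rw [hz]
    simp [← h]
  · have hz : pvW piles 0 ((piles.length : Int) - 1) ≠ 0 := fun hc =>
      h ((palindrome_iff piles).mpr ((pvW_zero_iff piles 0 ((piles.length : Int) - 1)).mp hc))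
    have hpos := pvW_nonneg piles 0 ((piles.length : Int) - 1)
    have hb : (piles != piles.reverse) = true := by simp [h]
    rw [hb, decide_eq_true_eq]
    omega
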